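-- pv_equiv track=rewrite | github.com/gpscal/researchsite | pdf_service.py | _create_context_preview
-- ===== SOURCE A (Python) =====
-- def _create_context_preview(text: str, query: str, max_length: int = 300) -> str:
--     """Create a preview with context around query terms"""
--     # Simple implementation: find the first occurrence of query terms
--     text = text.lower()
--     query_terms = query.lower().split()
--
--     # Find best match position
--     best_pos = 0
--     best_score = 0
--
--     for i in range(len(text) - 20):
--         window = text[i:i+200]
--         score = sum(1 for term in query_terms if term in window)
--         if score > best_score:
--             best_score = score
--             best_pos = i
--
--     # Extract context
--     start = max(0, best_pos - 50)
--     end = min(len(text), best_pos + max_length - 50)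
--
--     # Truncate to word boundaries
--     if start > 0:
--         while start < len(text) and text[start] != ' ':
--             start += 1
--
--     if end < len(text):
--         while end > 0 and text[end] != ' ':
--             end -= 1
--
--     preview = text[start:end].strip()
--
--     # Add ellipsis if truncated
--     if start > 0:
--         preview = "..." + preview
--     if end < len(text):
--         preview = preview + "..."
--
--     return preview
-- ===== SOURCE B (Python) =====
-- def _create_context_preview(text: str, query: str, max_length: int = 300) -> str:
--     """Create a preview with context around query terms"""
--     text = text.lower()
--     n = len(text)
--     m = n - 20
--     query_terms = query.lower().split()
--
--     # Score every window in one forward sweep per term: keep the position of the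
--     # term's next occurrence at or after the window start (recomputed with
--     # C-level str.find only when the window start passes it), instead of
--     # slicing out and substring-searching a 200-char window per position.
--     scores = [0] * max(m, 0)
--     for term in query_terms:
--         tl = len(term)
--         cov = []
--         nxt = text.find(term)
--         for i in range(m):
--             if nxt != -1 and nxt < i:
--                 nxt = text.find(term, i)
--             cov.append(1 if nxt != -1 and nxt + tl <= i + 200 else 0)
--         scores = [s + c for s, c in zip(scores, cov)]
--
--     best_pos = 0
--     best_score = 0
--     for i, s in enumerate(scores):
--         if s > best_score:
--             best_score = s
--             best_pos = i
--
--     start = max(0, best_pos - 50)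
--     end = min(n, best_pos + max_length - 50)
--
--     # Snap to word boundaries with find on the text / on the reversed prefix
--     if start > 0:
--         sp = text.find(' ', start)
--         start = sp if sp != -1 else n
--
--     if 0 < end < n:
--         r = text[end::-1].find(' ')
--         end = end - r if r != -1 else 0
--
--     preview = text[start:end].strip()
--     if start > 0:
--         preview = "..." + preview
--     if end < n:
--         preview = preview + "..."
--     return preview
-- ===== Notes on version B (the rewrite author's own statement) =====
-- stated objective: faster
-- what changed: Instead of slicing out a 200-char window at every text position and substring-searching each query term in it, B does one forward sweep per term that carries the term's next occurrence position (recomputed with str.find only when the window start passes it), accumulates per-window 0/1 coverage into a score array, and takes the first argmax; word-boundary snapping uses find/reversed-prefix find instead of character-stepping while loops.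
import Mathlib
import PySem

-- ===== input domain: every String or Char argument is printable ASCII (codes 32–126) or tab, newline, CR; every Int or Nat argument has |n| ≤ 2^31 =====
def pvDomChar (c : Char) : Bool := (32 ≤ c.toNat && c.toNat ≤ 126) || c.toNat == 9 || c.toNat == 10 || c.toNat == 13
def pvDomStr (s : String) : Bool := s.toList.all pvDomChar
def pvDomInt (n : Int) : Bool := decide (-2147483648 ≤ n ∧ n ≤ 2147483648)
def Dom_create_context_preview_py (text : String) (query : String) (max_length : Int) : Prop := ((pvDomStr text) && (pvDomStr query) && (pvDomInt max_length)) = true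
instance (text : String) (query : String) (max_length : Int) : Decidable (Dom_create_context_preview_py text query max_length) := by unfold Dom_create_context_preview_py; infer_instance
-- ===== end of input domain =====

-- B replaces A's per-position 200-char window slicing + substring searches by one forward
-- sweep per query term that carries the term's next occurrence position (objective: faster,
-- measured).

-- ===== PORT A =====
-- A's `while start < len(text) and text[start] != ' ': start += 1`
def pvAdvance (t : List Char) (s : Int) : Int :=
  if h : s < (t.length : Int) ∧ PySem.List.pyGetD t s ' ' ≠ ' ' then pvAdvance t (s + 1) else s
termination_by ((t.length : Int) - s).toNat
decreasing_by omega

-- A's `while end > 0 and text[end] != ' ': end -= 1`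
def pvBack (t : List Char) (e : Int) : Int :=
  if h : 0 < e ∧ PySem.List.pyGetD t e ' ' ≠ ' ' then pvBack t (e - 1) else e
termination_by e.toNat
decreasing_by omega

-- body of A's `for i in range(len(text) - 20)` loop
def pvScoreStep (t : List Char) (terms : List (List Char)) (st : Int × Int) (i : Int) : Int × Int :=
  let window := PySem.List.slice t (some i) (some (i + 200))
  let score : Int := (terms.map (fun term => if PySem.Chars.isIn term window then (1 : Int) else 0)).sum
  if st.2 < score then (i, score) else st

def create_context_preview_py (text : String) (query : String) (max_length : Int) : String :=
  let t := PySem.Chars.lower text.toList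
  let query_terms := PySem.Chars.split₀ (PySem.Chars.lower query.toList)
  let n : Int := PySem.List.len t
  let bp_bs := (PySem.List.pyRange 0 (n - 20) 1).foldl (pvScoreStep t query_terms) (0, 0)
  let start0 : Int := max 0 (bp_bs.1 - 50)
  let end0 : Int := min n (bp_bs.1 + max_length - 50)
  let start1 : Int := if 0 < start0 then pvAdvance t start0 else start0
  let end1 : Int := if end0 < n then pvBack t end0 else end0
  let preview := PySem.Chars.strip (PySem.List.slice t (some start1) (some end1))
  let preview1 := if 0 < start1 then "...".toList ++ preview else preview
  let preview2 := if end1 < n then preview1 ++ "...".toList else preview1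
  String.ofList preview2

-- ===== PORT B =====
-- body of B's `for i in range(m)` sweep for one term (`nxt` = next occurrence at/after i, -1 = none)
def pvCovStep (t term : List Char) (tl : Int) (st : Int × List Int) (i : Int) : Int × List Int :=
  let nxt := if st.1 ≠ -1 ∧ st.1 < i then PySem.Chars.findFrom t term i else st.1
  (nxt, st.2 ++ [if nxt ≠ -1 ∧ nxt + tl ≤ i + 200 then (1 : Int) else 0])

-- body of B's `for term in query_terms` loop
def pvTermStep (t : List Char) (m : Int) (scores : List Int) (term : List Char) : List Int :=
  let tl : Int := PySem.List.len term
  let st := (PySem.List.pyRange 0 m 1).foldl (pvCovStep t term tl) (PySem.Chars.find t term, ([] : List Int))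
  (scores.zip st.2).map (fun p => p.1 + p.2)

-- body of B's `for i, s in enumerate(scores)` loop
def pvBestStep (st : Int × Int) (p : Int × Int) : Int × Int :=
  if st.2 < p.2 then (p.1, p.2) else st

def create_context_preview_py_alt (text : String) (query : String) (max_length : Int) : String :=
  let t := PySem.Chars.lower text.toList
  let n : Int := PySem.List.len t
  let m : Int := n - 20
  let query_terms := PySem.Chars.split₀ (PySem.Chars.lower query.toList)
  let scores := query_terms.foldl (pvTermStep t m) (List.replicate (max m 0).toNat (0 : Int))
  let bp_bs := (PySem.List.enumerate scores).foldl pvBestStep (0, 0)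
  let start0 : Int := max 0 (bp_bs.1 - 50)
  let end0 : Int := min n (bp_bs.1 + max_length - 50)
  let start1 : Int :=
    if 0 < start0 then
      let sp := PySem.Chars.findFrom t [' '] start0
      if sp ≠ -1 then sp else n
    else start0
  let end1 : Int :=
    if 0 < end0 ∧ end0 < n then
      -- Python `text[end::-1]` ported by hand as the reverse of `take (end+1)`;
      -- exact because 0 ≤ end < len(text) holds under this guard
      let r := PySem.Chars.find ((t.take (end0.toNat + 1)).reverse) [' ']
      if r ≠ -1 then end0 - r else 0
    else end0
  let preview := PySem.Chars.strip (PySem.List.slice t (some start1) (some end1))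
  let preview1 := if 0 < start1 then "...".toList ++ preview else preview
  let preview2 := if end1 < n then preview1 ++ "...".toList else preview1
  String.ofList preview2

-- ===== PRECONDITION & SPEC =====
def Spec_create_context_preview_py (text : String) (query : String) (max_length : Int) (out : String) : Prop := out = create_context_preview_py_alt text query max_length
instance (text : String) (query : String) (max_length : Int) (out : String) : Decidable (Spec_create_context_preview_py text query max_length out) := by unfold Spec_create_context_preview_py; infer_instance

-- ===== CLAIM (what is proved, stated in full; the proofs are below) =====
def Claim_equal_create_context_preview_py : Prop := ∀ (text : String) (query : String) (max_length : Int), Dom_create_context_preview_py text query max_length → Spec_create_context_preview_py text query max_length (create_context_preview_py text query max_length)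

-- ===== LEMMAS AND PROOFS =====

-- `findFrom` from a Nat start, as used by B's sweep
def pvF (t term : List Char) (k : Nat) : Int := PySem.Chars.findFrom t term (k : Int)

-- B's 0/1 coverage indicator for window k
def pvIndT (t term : List Char) (k : Nat) : Int :=
  if pvF t term k ≠ -1 ∧ pvF t term k + (term.length : Int) ≤ (k : Int) + 200 then 1 else 0

-- A's 0/1 "term in window" indicator for window k
def pvWinInd (t term : List Char) (k : Nat) : Int :=
  if PySem.Chars.isIn term (PySem.List.slice t (some (k : Int)) (some ((k : Int) + 200))) then 1 else 0

lemma pv_pref_singleton (a : Char) (l : List Char) : [a] <+: l ↔ l.head? = some a := by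
  constructor
  · rintro ⟨tl, rfl⟩; rfl
  · intro h; cases l with
    | nil => simp at h
    | cons x xs => simp at h; exact ⟨xs, by simp [h]⟩

lemma pv_infix_drop_iff (term s : List Char) :
    term <:+: s ↔ ∃ j : Nat, term <+: s.drop j := by
  rw [← PySem.Chars.isIn_iff_infix, ← PySem.Chars.exists_prefix_drop_iff_isIn]

lemma pv_ffrom_neg_iff (t term : List Char) (k : Nat) (hk : k ≤ t.length) :
    pvF t term k = -1 ↔ ∀ p : Nat, k ≤ p → ¬ term <+: t.drop p := by
  unfold pvF
  rw [PySem.Chars.findFrom_natCast_eq_neg_one_iff t term k hk, pv_infix_drop_iff]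
  constructor
  · intro h p hp hpre
    exact h ⟨p - k, by rwa [List.drop_drop, Nat.add_sub_cancel' hp]⟩
  · rintro h ⟨j, hj⟩
    rw [List.drop_drop] at hj
    exact h (k + j) (Nat.le_add_right _ _) hj

lemma pv_ffrom_eq_of (t term : List Char) (k p : Nat) (hk : k ≤ t.length) (hkp : k ≤ p)
    (hocc : term <+: t.drop p) (hmin : ∀ q : Nat, k ≤ q → q < p → ¬ term <+: t.drop q) :
    pvF t term k = (p : Int) := by
  have hne : pvF t term k ≠ -1 :=
    fun h => (pv_ffrom_neg_iff t term k hk).mp h p hkp hocc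
  obtain ⟨hge, hocc', hmin'⟩ := PySem.Chars.findFrom_natCast_spec t term k hk hne
  simp only [pvF] at *
  have h0 : (0 : Int) ≤ PySem.Chars.findFrom t term (k : Int) := le_trans (by positivity) hge
  have hle : (PySem.Chars.findFrom t term (k : Int)).toNat ≤ p := by
    by_contra hgt
    exact hmin' p hkp (by omega) hocc
  have hge2 : p ≤ (PySem.Chars.findFrom t term (k : Int)).toNat := by
    by_contra hlt
    exact hmin (PySem.Chars.findFrom t term (k : Int)).toNat (by omega) (by omega) hocc'
  omega

lemma pv_ffrom_step (t term : List Char) (k' k : Nat) (hk : k ≤ t.length) (h1 : k' ≤ k) :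
    (if pvF t term k' ≠ -1 ∧ pvF t term k' < (k : Int) then PySem.Chars.findFrom t term (k : Int)
     else pvF t term k') = pvF t term k := by
  have hk' : k' ≤ t.length := le_trans h1 hk
  by_cases hneg : pvF t term k' = -1
  · rw [if_neg (by simp [hneg])]
    rw [hneg]
    symm
    rw [pv_ffrom_neg_iff t term k hk]
    intro p hp
    exact (pv_ffrom_neg_iff t term k' hk').mp hneg p (le_trans h1 hp)
  · obtain ⟨hge, hocc, hmin⟩ := PySem.Chars.findFrom_natCast_spec t term k' hk' hneg
    simp only [pvF] at *
    have h0 : (0 : Int) ≤ PySem.Chars.findFrom t term (k' : Int) := le_trans (by positivity) hge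
    by_cases hlt : PySem.Chars.findFrom t term (k' : Int) < (k : Int)
    · rw [if_pos ⟨hneg, hlt⟩]
    · rw [if_neg (by tauto)]
      have := pv_ffrom_eq_of t term k (PySem.Chars.findFrom t term (k' : Int)).toNat hk
        (by omega) hocc (fun q hq1 hq2 => hmin q (le_trans h1 hq1) hq2)
      simp only [pvF] at this
      rw [this]
      omega

lemma pv_winInd_eq (t term : List Char) (k : Nat) (hk : k < t.length) :
    pvWinInd t term k = pvIndT t term k := by
  have hkle : k ≤ t.length := le_of_lt hk
  unfold pvWinInd pvIndT
  have hslice : PySem.List.slice t (some (k : Int)) (some ((k : Int) + 200)) = (t.drop k).take 200 := by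
    have h := PySem.List.slice_natCast_add t k 200
    norm_num at h
    exact h
  rw [hslice]
  have hiff : PySem.Chars.isIn term ((t.drop k).take 200) = true ↔
      (pvF t term k ≠ -1 ∧ pvF t term k + (term.length : Int) ≤ (k : Int) + 200) := by
    rw [← PySem.Chars.exists_prefix_drop_iff_isIn]
    constructor
    · rintro ⟨j, hj⟩
      rw [List.drop_take, List.drop_drop] at hj
      obtain ⟨hpre, hlen⟩ := List.prefix_take_iff.mp hj
      by_cases hterm : term = []
      · subst hterm
        have h0 : pvF t [] k = (k : Int) :=
          pv_ffrom_eq_of t [] k k hkle le_rfl (List.nil_prefix) (by omega)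
        rw [h0]
        constructor
        · omega
        · simp
      · have htl : 0 < term.length := List.length_pos_iff.mpr hterm
        have hj200 : j + term.length ≤ 200 := by omega
        have hne : pvF t term k ≠ -1 := fun h =>
          (pv_ffrom_neg_iff t term k hkle).mp h (k + j) (by omega) hpre
        obtain ⟨hge, hocc, hmin⟩ := PySem.Chars.findFrom_natCast_spec t term k hkle hne
        have h0 : (0 : Int) ≤ pvF t term k := by simp only [pvF]; omega
        have hle : (pvF t term k).toNat ≤ k + j := by
          by_contra hgt
          exact hmin (k + j) (by omega) (by simp only [pvF] at *; omega) hpre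
        refine ⟨hne, ?_⟩
        simp only [pvF] at *
        omega
    · rintro ⟨hne, hlen⟩
      obtain ⟨hge, hocc, hmin⟩ := PySem.Chars.findFrom_natCast_spec t term k hkle hne
      have h0 : (0 : Int) ≤ pvF t term k := by simp only [pvF]; omega
      refine ⟨(pvF t term k).toNat - k, ?_⟩
      rw [List.drop_take, List.drop_drop]
      rw [List.prefix_take_iff]
      constructor
      · have hkk : k + ((pvF t term k).toNat - k) = (pvF t term k).toNat := by
          simp only [pvF] at *
          omega
        rw [hkk]
        exact hocc
      · simp only [pvF] at *
        omega
  split_ifs with h1 h2 h3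
  · rfl
  · exact absurd (hiff.mp h1) h2
  · exact absurd (hiff.mpr h3) h1
  · rfl

lemma pv_pyRange_zero (m : Int) :
    PySem.List.pyRange 0 m 1 = (List.range m.toNat).map (fun (i : Nat) => (i : Int)) := by
  by_cases h : 0 ≤ m
  · obtain ⟨k, rfl⟩ : ∃ k : Nat, m = (k : Int) := ⟨m.toNat, by omega⟩
    rw [PySem.List.pyRange_zero_natCast]
    simp [List.map_eq_flatMap]
  · have h1 : PySem.List.pyRange 0 m 1 = [] := by simp [PySem.List.pyRange]; omega
    have h2 : m.toNat = 0 := by omega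
    simp [h1, h2]

lemma pv_covLoop (t term : List Char) :
    ∀ (c k : Nat), k + c ≤ t.length →
    ∀ (nxt : Int) (acc : List Int), (∃ k', k' ≤ k ∧ nxt = pvF t term k') →
    (List.foldl (pvCovStep t term (PySem.List.len term)) (nxt, acc)
      ((List.range' k c).map (fun (i : Nat) => (i : Int)))).2
    = acc ++ (List.range' k c).map (fun i => pvIndT t term i) := by
  intro c
  induction c with
  | zero => intro k hlen nxt acc hinv; simp
  | succ c ih =>
      intro k hlen nxt acc hinv
      obtain ⟨k', hk'le, rfl⟩ := hinv
      rw [List.range'_succ, List.map_cons, List.foldl_cons, List.map_cons]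
      have hstep : pvCovStep t term (PySem.List.len term) (pvF t term k', acc) (k : Int)
          = (pvF t term k, acc ++ [pvIndT t term k]) := by
        simp only [pvCovStep]
        rw [pv_ffrom_step t term k' k (by omega) hk'le]
        unfold pvIndT
        simp [PySem.List.len_eq, pvF]
      rw [hstep]
      rw [ih (k + 1) (by omega) (pvF t term k) (acc ++ [pvIndT t term k]) ⟨k, by omega, rfl⟩]
      simp

lemma pv_cov (t term : List Char) (m : Int) (hm : m ≤ (t.length : Int)) :
    ((PySem.List.pyRange 0 m 1).foldl (pvCovStep t term (PySem.List.len term))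
      (PySem.Chars.find t term, ([] : List Int))).2
    = (List.range m.toNat).map (fun i => pvIndT t term i) := by
  rw [pv_pyRange_zero, List.range_eq_range']
  have h0 : PySem.Chars.find t term = pvF t term 0 := by
    simp [pvF, PySem.Chars.findFrom_zero]
  rw [h0]
  have := pv_covLoop t term m.toNat 0 (by omega) (pvF t term 0) [] ⟨0, le_rfl, rfl⟩
  simpa using this

lemma pv_terms (t : List Char) (m : Int) (hm : m ≤ (t.length : Int)) :
    ∀ (terms : List (List Char)) (f : Nat → Int),
    terms.foldl (pvTermStep t m) ((List.range m.toNat).map f)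
    = (List.range m.toNat).map (fun i => f i + (terms.map (fun term => pvIndT t term i)).sum) := by
  intro terms
  induction terms with
  | nil => intro f; simp
  | cons term ts ih =>
      intro f
      rw [List.foldl_cons]
      have hstep : pvTermStep t m ((List.range m.toNat).map f) term
          = (List.range m.toNat).map (fun i => f i + pvIndT t term i) := by
        simp only [pvTermStep]
        rw [pv_cov t term m hm]
        rw [List.zip_map']
        rw [List.map_map]
        rfl
      rw [hstep, ih (fun i => f i + pvIndT t term i)]
      apply List.map_congr_left
      intro i _
      simp [add_assoc]

lemma pv_enum_cons {α : Type} (x : α) (xs : List α) (s : Int) :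
    PySem.List.enumerate (x :: xs) s = (s, x) :: PySem.List.enumerate xs (s + 1) := by
  simp [PySem.List.enumerate]

lemma pv_enum_map_range' (f : Nat → Int) :
    ∀ (c k : Nat), PySem.List.enumerate ((List.range' k c).map f) (k : Int)
      = (List.range' k c).map (fun (i : Nat) => ((i : Int), f i)) := by
  intro c
  induction c with
  | zero => intro k; simp

  | succ n ih =>
      intro k
      rw [List.range'_succ]
      simp only [List.map_cons, pv_enum_cons]
      have : ((k : Int) + 1) = ((k + 1 : Nat) : Int) := by push_cast; ring
      rw [this, ih (k + 1)]

lemma pv_replicate_map (M : Nat) :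
    List.replicate M (0 : Int) = (List.range M).map (fun _ => (0 : Int)) := by
  rw [show (fun _ : Nat => (0 : Int)) = Function.const Nat (0 : Int) from rfl,
    List.map_const, List.length_range]

lemma pv_bestPair_eq (t : List Char) (terms : List (List Char)) :
    (PySem.List.pyRange 0 (PySem.List.len t - 20) 1).foldl (pvScoreStep t terms) (0, 0)
    = (PySem.List.enumerate
        (terms.foldl (pvTermStep t (PySem.List.len t - 20))
          (List.replicate (max (PySem.List.len t - 20) 0).toNat (0 : Int)))).foldl pvBestStep (0, 0) := by
  simp only [PySem.List.len_eq]
  have hmle : (t.length : Int) - 20 ≤ (t.length : Int) := by omega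
  rw [pv_pyRange_zero ((t.length : Int) - 20), List.foldl_map]
  rw [(by omega : (max ((t.length : Int) - 20) 0).toNat = ((t.length : Int) - 20).toNat)]
  rw [pv_replicate_map ((t.length : Int) - 20).toNat]
  rw [pv_terms t ((t.length : Int) - 20) hmle]
  rw [List.range_eq_range']
  have henum := pv_enum_map_range'
    (fun i => (0 : Int) + (terms.map (fun term => pvIndT t term i)).sum)
    ((t.length : Int) - 20).toNat 0
  rw [Nat.cast_zero] at henum
  rw [henum, List.foldl_map, ← List.range_eq_range']
  apply PySem.List.foldl_congr_mem
  intro acc i hi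
  have hiM : i < ((t.length : Int) - 20).toNat := List.mem_range.mp hi
  have hilen : i < t.length := by omega
  simp only [pvScoreStep, pvBestStep]
  have hscore : ((terms.map (fun term =>
      if PySem.Chars.isIn term (PySem.List.slice t (some (i : Int)) (some ((i : Int) + 200))) then (1 : Int) else 0)).sum : Int)
      = (0 : Int) + (terms.map (fun term => pvIndT t term i)).sum := by
    rw [zero_add]
    congr 1
    apply List.map_congr_left
    intro term _
    have h := pv_winInd_eq t term i hilen
    unfold pvWinInd at h
    exact h
  rw [hscore]

lemma pv_bestPair_bound (t : List Char) (terms : List (List Char)) :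
    0 ≤ ((PySem.List.pyRange 0 (PySem.List.len t - 20) 1).foldl (pvScoreStep t terms) (0, 0)).1 ∧
    (((PySem.List.pyRange 0 (PySem.List.len t - 20) 1).foldl (pvScoreStep t terms) (0, 0)).1 = 0 ∨
      ((PySem.List.pyRange 0 (PySem.List.len t - 20) 1).foldl (pvScoreStep t terms) (0, 0)).1
        < PySem.List.len t - 20) := by
  simp only [PySem.List.len_eq]
  rw [pv_pyRange_zero, List.foldl_map]
  refine List.foldlRecOn (List.range ((t.length : Int) - 20).toNat)
    (motive := fun st => 0 ≤ st.1 ∧ (st.1 = 0 ∨ st.1 < (t.length : Int) - 20)) _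
    (b := ((0 : Int), (0 : Int))) ⟨le_refl 0, Or.inl rfl⟩ ?_
  intro b hb a ha
  have ham : (a : Int) < (t.length : Int) - 20 := by
    have := List.mem_range.mp ha
    omega
  simp only [pvScoreStep]
  split_ifs with h
  · exact ⟨Int.natCast_nonneg a, Or.inr ham⟩
  · exact hb

lemma pv_advA (t : List Char) (q : Nat) (hql : q < t.length) (hq : t[q]? = some ' ') :
    ∀ (n s : Nat), q - s = n → s ≤ q → (∀ r : Nat, s ≤ r → r < q → t[r]? ≠ some ' ') →
    pvAdvance t (s : Int) = (q : Int) := by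
  intro n
  induction n with
  | zero =>
      intro s hn hsq hmin
      have hs : s = q := by omega
      subst hs
      rw [pvAdvance, dif_neg (by
        rw [PySem.List.pyGetD_natCast, List.getD_eq_getElem?_getD, hq]
        simp)]
  | succ n ih =>
      intro s hn hsq hmin
      have hlt : s < q := by omega
      have hsl : s < t.length := by omega
      rw [pvAdvance, dif_pos]
      · rw [(by push_cast; ring : ((s : Int) + 1) = ((s + 1 : Nat) : Int))]
        exact ih (s + 1) (by omega) (by omega) (fun r h1 h2 => hmin r (by omega) h2)
      · refine ⟨by exact_mod_cast hsl, ?_⟩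
        rw [PySem.List.pyGetD_natCast, List.getD_eq_getElem?_getD]
        intro hcon
        rw [List.getElem?_eq_getElem hsl] at hcon
        exact hmin s le_rfl hlt (by rw [List.getElem?_eq_getElem hsl]; simpa using hcon)

lemma pv_advB (t : List Char) :
    ∀ (n s : Nat), t.length - s = n → s ≤ t.length →
    (∀ r : Nat, s ≤ r → r < t.length → t[r]? ≠ some ' ') →
    pvAdvance t (s : Int) = (t.length : Int) := by
  intro n
  induction n with
  | zero =>
      intro s hn hsq hmin
      have hs : s = t.length := by omega
      subst hs
      rw [pvAdvance, dif_neg (by simp)]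
  | succ n ih =>
      intro s hn hsq hmin
      have hsl : s < t.length := by omega
      rw [pvAdvance, dif_pos]
      · rw [(by push_cast; ring : ((s : Int) + 1) = ((s + 1 : Nat) : Int))]
        exact ih (s + 1) (by omega) (by omega) (fun r h1 h2 => hmin r (by omega) h2)
      · refine ⟨by exact_mod_cast hsl, ?_⟩
        rw [PySem.List.pyGetD_natCast, List.getD_eq_getElem?_getD]
        intro hcon
        rw [List.getElem?_eq_getElem hsl] at hcon
        exact hmin s le_rfl hsl (by rw [List.getElem?_eq_getElem hsl]; simpa using hcon)

lemma pv_advance_eq (t : List Char) (s : Nat) (hs : s ≤ t.length) :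
    pvAdvance t (s : Int)
    = (if PySem.Chars.findFrom t [' '] (s : Int) ≠ -1 then PySem.Chars.findFrom t [' '] (s : Int)
       else (t.length : Int)) := by
  by_cases hne : PySem.Chars.findFrom t [' '] (s : Int) = -1
  · rw [if_neg (by simp [hne])]
    have hall := (PySem.Chars.findFrom_natCast_eq_neg_one_iff t [' '] s hs).mp hne
    apply pv_advB t (t.length - s) s rfl hs
    intro r h1 h2 hcon
    apply hall
    rw [pv_infix_drop_iff]
    refine ⟨r - s, ?_⟩
    rw [pv_pref_singleton, List.drop_drop, List.head?_drop]
    rw [(by omega : s + (r - s) = r)]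
    exact hcon
  · obtain ⟨hge, hocc, hmin⟩ := PySem.Chars.findFrom_natCast_spec t [' '] s hs hne
    rw [if_pos hne]
    have hq : t[(PySem.Chars.findFrom t [' '] (s : Int)).toNat]? = some ' ' := by
      rw [← List.head?_drop]
      exact (pv_pref_singleton _ _).mp hocc
    have hql : (PySem.Chars.findFrom t [' '] (s : Int)).toNat < t.length := by
      by_contra h
      rw [List.getElem?_eq_none (by omega)] at hq
      cases hq
    have := pv_advA t (PySem.Chars.findFrom t [' '] (s : Int)).toNat hql hq
      ((PySem.Chars.findFrom t [' '] (s : Int)).toNat - s) s rfl (by omega)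
      (fun r h1 h2 hcon => hmin r h1 h2 (by
        rw [pv_pref_singleton, List.head?_drop]
        exact hcon))
    rw [this]
    omega

lemma pv_backA (t : List Char) (q : Nat) (hq : t[q]? = some ' ') :
    ∀ (n e : Nat), e - q = n → q ≤ e → e < t.length →
    (∀ r : Nat, q < r → r ≤ e → t[r]? ≠ some ' ') →
    pvBack t (e : Int) = (q : Int) := by
  intro n
  induction n with
  | zero =>
      intro e hn hqe hel hmin
      have he : e = q := by omega
      subst he
      rw [pvBack, dif_neg (by
        rw [PySem.List.pyGetD_natCast, List.getD_eq_getElem?_getD, hq]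
        simp)]
  | succ n ih =>
      intro e hn hqe hel hmin
      have hlt : q < e := by omega
      rw [pvBack, dif_pos]
      · rw [(by omega : ((e : Int) - 1) = ((e - 1 : Nat) : Int))]
        exact ih (e - 1) (by omega) (by omega) (by omega) (fun r h1 h2 => hmin r h1 (by omega))
      · refine ⟨by exact_mod_cast (by omega : 0 < e), ?_⟩
        rw [PySem.List.pyGetD_natCast, List.getD_eq_getElem?_getD]
        intro hcon
        rw [List.getElem?_eq_getElem hel] at hcon
        exact hmin e hlt le_rfl (by rw [List.getElem?_eq_getElem hel]; simpa using hcon)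

lemma pv_backB (t : List Char) :
    ∀ (e : Nat), e < t.length → (∀ r : Nat, r ≤ e → t[r]? ≠ some ' ') →
    pvBack t (e : Int) = 0 := by
  intro e
  induction e with
  | zero =>
      intro hel hmin
      rw [pvBack, dif_neg (by simp)]
      simp
  | succ e ih =>
      intro hel hmin
      rw [pvBack, dif_pos]
      · rw [(by push_cast; ring : (((e + 1 : Nat) : Int) - 1) = ((e : Nat) : Int))]
        exact ih (by omega) (fun r h1 => hmin r (by omega))
      · refine ⟨by exact_mod_cast Nat.succ_pos e, ?_⟩
        rw [PySem.List.pyGetD_natCast, List.getD_eq_getElem?_getD]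
        intro hcon
        rw [List.getElem?_eq_getElem hel] at hcon
        exact hmin (e + 1) le_rfl (by rw [List.getElem?_eq_getElem hel]; simpa using hcon)

lemma pv_rev_getElem? (t : List Char) (e j : Nat) (he : e < t.length) (hj : j ≤ e) :
    ((t.take (e + 1)).reverse)[j]? = t[e - j]? := by
  have hlen : (t.take (e + 1)).length = e + 1 := by
    rw [List.length_take]
    omega
  have hjl : j < (t.take (e + 1)).reverse.length := by
    simp only [List.length_reverse, List.length_take]
    omega
  rw [List.getElem?_eq_getElem hjl, List.getElem_reverse]
  rw [List.getElem_take]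
  rw [List.getElem?_eq_getElem (by omega : e - j < t.length)]
  rw [Option.some_inj]
  congr 1
  · omega

lemma pv_back_eq (t : List Char) (e : Nat) (he : e < t.length) :
    pvBack t (e : Int)
    = (if PySem.Chars.find ((t.take (e + 1)).reverse) [' '] ≠ -1
       then (e : Int) - PySem.Chars.find ((t.take (e + 1)).reverse) [' '] else 0) := by
  have hlenrev : ((t.take (e + 1)).reverse).length = e + 1 := by
    rw [List.length_reverse, List.length_take]
    omega
  by_cases hf : PySem.Chars.find ((t.take (e + 1)).reverse) [' '] = -1
  · rw [if_neg (by simp [hf])]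
    have hall := (PySem.Chars.find_eq_neg_one_iff _ _).mp hf
    apply pv_backB t e he
    intro r hr hcon
    apply hall
    rw [pv_infix_drop_iff]
    refine ⟨e - r, ?_⟩
    rw [pv_pref_singleton, List.head?_drop]
    rw [pv_rev_getElem? t e (e - r) he (by omega)]
    rw [(by omega : e - (e - r) = r)]
    exact hcon
  · have h0 : 0 ≤ PySem.Chars.find ((t.take (e + 1)).reverse) [' '] := by
      have := PySem.Chars.neg_one_le_find ((t.take (e + 1)).reverse) [' ']
      omega
    obtain ⟨hocc, hmin⟩ := PySem.Chars.find_spec h0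
    have hrl : (PySem.Chars.find ((t.take (e + 1)).reverse) [' ']).toNat < e + 1 := by
      have := PySem.Chars.find_le_length ((t.take (e + 1)).reverse) [' ']
      rw [hlenrev] at this
      by_cases hlt : (PySem.Chars.find ((t.take (e + 1)).reverse) [' ']).toNat < e + 1
      · exact hlt
      · exfalso
        have heq : (PySem.Chars.find ((t.take (e + 1)).reverse) [' ']).toNat = e + 1 := by omega
        rw [pv_pref_singleton, List.head?_drop] at hocc
        rw [List.getElem?_eq_none (by omega)] at hocc
        cases hocc
    have hq : t[e - (PySem.Chars.find ((t.take (e + 1)).reverse) [' ']).toNat]? = some ' ' := by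
      rw [← pv_rev_getElem? t e _ he (by omega)]
      rw [← List.head?_drop]
      exact (pv_pref_singleton _ _).mp hocc
    have hminq : ∀ r : Nat, e - (PySem.Chars.find ((t.take (e + 1)).reverse) [' ']).toNat < r → r ≤ e →
        t[r]? ≠ some ' ' := by
      intro r h1 h2 hcon
      apply hmin (e - r) (by omega)
      rw [pv_pref_singleton, List.head?_drop]
      rw [pv_rev_getElem? t e (e - r) he (by omega)]
      rw [(by omega : e - (e - r) = r)]
      exact hcon
    rw [if_pos hf]
    rw [pv_backA t (e - (PySem.Chars.find ((t.take (e + 1)).reverse) [' ']).toNat) hq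
      (e - (e - (PySem.Chars.find ((t.take (e + 1)).reverse) [' ']).toNat)) e rfl (by omega) he hminq]
    omega

-- proof-layer views of the two tails (definitionally equal to the ports' tails)
def pvStart0 (bp : Int) : Int := max 0 (bp - 50)

def pvEnd0 (t : List Char) (ml bp : Int) : Int := min (PySem.List.len t) (bp + ml - 50)

def pvStartA (t : List Char) (bp : Int) : Int :=
  if 0 < pvStart0 bp then pvAdvance t (pvStart0 bp) else pvStart0 bp

def pvEndA (t : List Char) (ml bp : Int) : Int :=
  if pvEnd0 t ml bp < PySem.List.len t then pvBack t (pvEnd0 t ml bp) else pvEnd0 t ml bp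

def pvStartB (t : List Char) (bp : Int) : Int :=
  if 0 < pvStart0 bp then
    let sp := PySem.Chars.findFrom t [' '] (pvStart0 bp)
    if sp ≠ -1 then sp else PySem.List.len t
  else pvStart0 bp

def pvEndB (t : List Char) (ml bp : Int) : Int :=
  if 0 < pvEnd0 t ml bp ∧ pvEnd0 t ml bp < PySem.List.len t then
    let r := PySem.Chars.find ((t.take ((pvEnd0 t ml bp).toNat + 1)).reverse) [' ']
    if r ≠ -1 then pvEnd0 t ml bp - r else 0
  else pvEnd0 t ml bp

def pvFinish (t : List Char) (start1 end1 : Int) : List Char :=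
  let preview := PySem.Chars.strip (PySem.List.slice t (some start1) (some end1))
  let preview1 := if 0 < start1 then "...".toList ++ preview else preview
  if end1 < PySem.List.len t then preview1 ++ "...".toList else preview1

def pvTailA (t : List Char) (ml bp : Int) : List Char := pvFinish t (pvStartA t bp) (pvEndA t ml bp)

def pvTailB (t : List Char) (ml bp : Int) : List Char := pvFinish t (pvStartB t bp) (pvEndB t ml bp)

lemma pv_start_eq (t : List Char) (bp : Int) (_h0 : 0 ≤ bp)
    (hb : bp = 0 ∨ bp < PySem.List.len t - 20) :
    pvStartA t bp = pvStartB t bp := by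
  simp only [pvStartA, pvStartB, pvStart0, PySem.List.len_eq] at hb ⊢
  by_cases h : 0 < max 0 (bp - 50)
  · rw [if_pos h, if_pos h]
    have hbp : bp < (t.length : Int) - 20 := by
      rcases hb with h1 | h1
      · omega
      · exact h1
    have hsn : (max 0 (bp - 50)).toNat ≤ t.length := by omega
    have hcast : max 0 (bp - 50) = (((max 0 (bp - 50)).toNat : Nat) : Int) := by omega
    rw [hcast, pv_advance_eq t (max 0 (bp - 50)).toNat hsn]
  · rw [if_neg h, if_neg h]

lemma pv_end_eq (t : List Char) (ml bp : Int) :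
    pvEndA t ml bp = pvEndB t ml bp := by
  simp only [pvEndA, pvEndB, pvEnd0, PySem.List.len_eq]
  by_cases hlt : min ((t.length : Int)) (bp + ml - 50) < (t.length : Int)
  · rw [if_pos hlt]
    by_cases hpos : 0 < min ((t.length : Int)) (bp + ml - 50)
    · rw [if_pos ⟨hpos, hlt⟩]
      have hcast : min ((t.length : Int)) (bp + ml - 50)
          = (((min ((t.length : Int)) (bp + ml - 50)).toNat : Nat) : Int) := by omega
      rw [hcast, pv_back_eq t (min ((t.length : Int)) (bp + ml - 50)).toNat (by omega)]
      simp only [Int.toNat_natCast]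
    · rw [if_neg (by tauto)]
      rw [pvBack, dif_neg (fun hc => hpos hc.1)]
  · rw [if_neg hlt, if_neg (by tauto)]

lemma pv_tails (t : List Char) (ml bp : Int) (h0 : 0 ≤ bp)
    (hb : bp = 0 ∨ bp < PySem.List.len t - 20) :
    pvTailA t ml bp = pvTailB t ml bp := by
  unfold pvTailA pvTailB
  rw [pv_start_eq t bp h0 hb, pv_end_eq t ml bp]

-- ===== VERDICT (by name: the statement is the Claim_ definition above) =====
theorem create_context_preview_py_spec : Claim_equal_create_context_preview_py := by
  intro text query max_length _dom
  unfold Spec_create_context_preview_py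
  have hA : create_context_preview_py text query max_length
      = String.ofList (pvTailA (PySem.Chars.lower text.toList) max_length
          (((PySem.List.pyRange 0 (PySem.List.len (PySem.Chars.lower text.toList) - 20) 1).foldl
              (pvScoreStep (PySem.Chars.lower text.toList)
                (PySem.Chars.split₀ (PySem.Chars.lower query.toList))) (0, 0)).1)) := rfl
  have hB : create_context_preview_py_alt text query max_length
      = String.ofList (pvTailB (PySem.Chars.lower text.toList) max_length
          (((PySem.List.enumerate
              ((PySem.Chars.split₀ (PySem.Chars.lower query.toList)).foldl
                (pvTermStep (PySem.Chars.lower text.toList)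
                  (PySem.List.len (PySem.Chars.lower text.toList) - 20))
                (List.replicate (max (PySem.List.len (PySem.Chars.lower text.toList) - 20) 0).toNat (0 : Int)))).foldl
              pvBestStep (0, 0)).1)) := rfl
  rw [hA, hB, ← pv_bestPair_eq]
  congr 1
  exact pv_tails _ max_length _
    (pv_bestPair_bound (PySem.Chars.lower text.toList) (PySem.Chars.split₀ (PySem.Chars.lower query.toList))).1
    (pv_bestPair_bound (PySem.Chars.lower text.toList) (PySem.Chars.split₀ (PySem.Chars.lower query.toList))).2
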